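-- pv_equiv track=rewrite | github.com/HarshCasper/NeoAlgo | Python/cryptography/Playfair_Cipher.py | create_digraphs
-- ===== SOURCE A (Python) =====
-- def create_digraphs(text):
--     '''
--     This function is responsible to creating digraphs of the input plaintext.
--     The entire string is split into pairs of two characters. In case a
--     pair has same characters, the first occurence of char is paired with 'X' and
--     the second occurence of char is paired with the next char in the plaintext.
--
--     :param text: input plaintext for encryption
--     :type str
--
--     :return digraphs: a list of all characters in the plaintext in pairs of two
--     :type list
--     '''
--     digraphs = []
--     # list to keep track of extra 'x' added in the input text
--     flag = [True for x in text]
--     i = 0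
--     # if the text has odd number of characters, add an 'x' to make the count even
--     if len(text) % 2 != 0:
--         text = text + 'x'
--         flag.extend([False])
--
--     while i + 1 < len(text):
--         # checking if the current char and next char are same
--         if text[i] == text[i+1] and flag[i]:
--             # appending 'x' in place of repeating char
--             digraphs.append([text[i], 'x'])
--             new_text = text[:i+1] + 'x' + text[i+1:]
--             if len(new_text) % 2 != 0:
--                 text = text + 'x'
--                 flag.extend([False])
--             i = i + 1
--         else:
--             # pairing the current and next character
--             if flag[i] or flag[i+1]:
--                 digraphs.append([text[i], text[i+1]])
--             i = i + 2
--     return digraphs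
-- ===== SOURCE B (Python) =====
-- def create_digraphs(text):
--     '''Single left-to-right pass over the original text: a repeated (or final
--     unpaired) character is paired with 'x' and the scan advances one position,
--     otherwise two distinct characters form a pair and it advances two.'''
--     digraphs = []
--     i = 0
--     n = len(text)
--     while i < n:
--         if i + 1 < n and text[i] != text[i + 1]:
--             digraphs.append([text[i], text[i + 1]])
--             i += 2
--         else:
--             digraphs.append([text[i], 'x'])
--             i += 1
--     return digraphs
-- ===== Notes on version B (the rewrite author's own statement) =====
-- stated objective: faster
-- what changed: B scans the original string once with an index (duplicate or final char pairs with 'x', otherwise advance by two), instead of A's while-loop that repeatedly builds O(n) slices of a growing padded copy of the text and a parallel flag list.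
import Mathlib
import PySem

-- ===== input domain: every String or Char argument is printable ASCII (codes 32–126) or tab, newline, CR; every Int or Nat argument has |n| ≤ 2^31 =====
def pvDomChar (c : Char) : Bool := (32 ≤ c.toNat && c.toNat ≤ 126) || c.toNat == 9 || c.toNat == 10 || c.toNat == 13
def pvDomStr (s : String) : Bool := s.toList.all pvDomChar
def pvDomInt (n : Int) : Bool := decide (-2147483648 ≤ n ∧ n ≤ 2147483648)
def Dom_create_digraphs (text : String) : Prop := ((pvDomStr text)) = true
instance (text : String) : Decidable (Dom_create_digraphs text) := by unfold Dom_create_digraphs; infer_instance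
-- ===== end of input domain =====

-- B replaces A's quadratic while-loop over a growing padded copy of the text (per-step O(n)
-- slicing and a parallel flag list) with a single O(n) index scan of the original string.

-- ===== PORT A =====
-- A's while loop; `fuel` only guards termination (the chosen fuel always suffices, proved below).
-- `text[i]` / `flag[i]` are rendered with getD: the loop guard keeps every index in range, so
-- this is exact where Python returns.
def pvLoopA (fuel : Nat) (text : List Char) (flag : List Bool) (i : Nat) : List (List String) :=
  match fuel with
  | 0 => []
  | fuel + 1 =>
    if i + 1 < text.length then
      if text.getD i ' ' = text.getD (i+1) ' ' ∧ flag.getD i false then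
        -- new_text = text[:i+1] + 'x' + text[i+1:]
        let new_text := PySem.List.slice text none (some ((i : Int)+1)) ++
                        'x' :: PySem.List.slice text (some ((i : Int)+1)) none
        if new_text.length % 2 ≠ 0 then
          [String.ofList [text.getD i ' '], "x"] :: pvLoopA fuel (text ++ ['x']) (flag ++ [false]) (i+1)
        else
          [String.ofList [text.getD i ' '], "x"] :: pvLoopA fuel text flag (i+1)
      else
        if flag.getD i false ∨ flag.getD (i+1) false then
          [String.ofList [text.getD i ' '], String.ofList [text.getD (i+1) ' ']] :: pvLoopA fuel text flag (i+2)
        else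
          pvLoopA fuel text flag (i+2)
    else []

def create_digraphs (text : String) : List (List String) :=
  let t := text.toList
  let flag := t.map (fun _ => true)
  if t.length % 2 ≠ 0 then
    pvLoopA (2 * (t.length + 1) + 2) (t ++ ['x']) (flag ++ [false]) 0
  else
    pvLoopA (2 * t.length + 2) t flag 0

-- ===== PORT B =====
-- B's single scan, on the suffix of the text starting at the current index.
def pvLoopB : List Char → List (List String)
  | [] => []
  | [c] => [[String.ofList [c], "x"]]
  | c1 :: c2 :: rest =>
    if c1 ≠ c2 then [String.ofList [c1], String.ofList [c2]] :: pvLoopB rest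
    else [String.ofList [c1], "x"] :: pvLoopB (c2 :: rest)

def create_digraphs_alt (text : String) : List (List String) :=
  pvLoopB text.toList

-- ===== PRECONDITION & SPEC =====
def Spec_create_digraphs (text : String) (out : List (List String)) : Prop := out = create_digraphs_alt text
instance (text : String) (out : List (List String)) : Decidable (Spec_create_digraphs text out) := by unfold Spec_create_digraphs; infer_instance

-- ===== CLAIM (what is proved, stated in full; the proofs are below) =====
def Claim_equal_create_digraphs : Prop := ∀ (text : String), Dom_create_digraphs text → Spec_create_digraphs text (create_digraphs text)

-- ===== LEMMAS AND PROOFS =====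

lemma pv_flag_getD (a m j : Nat) :
    (List.replicate a true ++ List.replicate m false).getD j false = decide (j < a) := by
  rcases Nat.lt_or_ge j a with h | h
  · simp [List.getD_eq_getElem?_getD, List.getElem?_append_left, h, List.length_replicate]
  · rcases Nat.lt_or_ge j (a + m) with h2 | h2
    · simp [List.getD_eq_getElem?_getD, List.getElem?_append_right, h, List.length_replicate]
    · have hl : (List.replicate a true ++ List.replicate m false).length ≤ j := by simp; omega
      simp [List.getD_eq_getElem?_getD, List.getElem?_eq_none_iff.2 hl]
      omega

lemma pv_text_getD (pre u : List Char) (k : Nat) (d : Char) :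
    (pre ++ u).getD (pre.length + k) d = u.getD k d := by
  simp [List.getD_eq_getElem?_getD, List.getElem?_append_right]

lemma pv_text_getD0 (pre u : List Char) (d : Char) :
    (pre ++ u).getD pre.length d = u.getD 0 d := by
  simpa using pv_text_getD pre u 0 d

lemma pv_newtext_len (text : List Char) (i : Nat) (h : i + 1 <= text.length) :
    (PySem.List.slice text none (some ((i : Int)+1)) ++
      'x' :: PySem.List.slice text (some ((i : Int)+1)) none).length = text.length + 1 := by
  rw [PySem.List.slice_to _ (by positivity), PySem.List.slice_from _ (by positivity)]
  simp

-- once the scan index has passed every True flag, the loop appends nothing more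
lemma pv_loopA_pad (fuel : Nat) : ∀ (text : List Char) (a m i : Nat),
    text.length = a + m → a <= i →
    pvLoopA fuel text (List.replicate a true ++ List.replicate m false) i = [] := by
  induction fuel with
  | zero => intro text a m i _ _; simp [pvLoopA]
  | succ fuel ih =>
    intro text a m i hlen hai
    have h1 : ¬ (i < a) := by omega
    have h2 : ¬ (i + 1 < a) := by omega
    simp only [pvLoopA, pv_flag_getD, h1, h2, decide_false, Bool.false_eq_true, and_false,
      or_self, if_false]
    split
    · exact ih text a m (i+2) hlen (by omega)
    · rfl

-- loop invariant: at index |pre|, with m trailing pads, A's loop produces B's scan of cs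
lemma pv_loopA_spec (fuel : Nat) : ∀ (cs pre : List Char) (m : Nat),
    2 * cs.length + m + 2 <= fuel →
    (m = 0 → cs.length % 2 = 0 ∧ (pre.length + cs.length) % 2 = 0) →
    pvLoopA fuel (pre ++ cs ++ List.replicate m 'x')
      (List.replicate (pre.length + cs.length) true ++ List.replicate m false) pre.length
    = pvLoopB cs := by
  induction fuel with
  | zero => intro cs pre m hf _; omega
  | succ fuel ih =>
    intro cs pre m hf hinv
    match cs with
    | [] =>
        simp only [List.length_nil, Nat.add_zero, pvLoopB]
        exact pv_loopA_pad (fuel+1) _ pre.length m pre.length (by simp) le_rfl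
    | [c] =>
        obtain ⟨m', rfl⟩ : ∃ m', m = m' + 1 := by
          rcases Nat.eq_zero_or_pos m with h0 | hpos
          · exact absurd (hinv h0).1 (by simp)
          · exact ⟨m - 1, by omega⟩
        rw [List.append_assoc]
        have hg : pre.length + 1 < (pre ++ ([c] ++ List.replicate (m'+1) 'x')).length := by
          simp
        have hc0 : (pre ++ ([c] ++ List.replicate (m'+1) 'x')).getD pre.length ' ' = c := by
          rw [pv_text_getD0]; rfl
        have hc1 : (pre ++ ([c] ++ List.replicate (m'+1) 'x')).getD (pre.length + 1) ' ' = 'x' := by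
          rw [pv_text_getD]
          simp [List.replicate_succ, List.getD]
        have hf0 : (List.replicate (pre.length + [c].length) true ++
            List.replicate (m'+1) false).getD pre.length false = true := by
          rw [pv_flag_getD]; simp
        have hf1 : (List.replicate (pre.length + [c].length) true ++
            List.replicate (m'+1) false).getD (pre.length + 1) false = false := by
          rw [pv_flag_getD]; simp
        have hL : (pre ++ ([c] ++ List.replicate (m'+1) 'x')).length
            = pre.length + m' + 2 := by simp; omega
        have hFl1 : List.replicate (pre.length + [c].length) true ++
              List.replicate (m'+1) false ++ [false]
            = List.replicate (pre.length + [c].length) true ++ List.replicate (m'+2) false := by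
          rw [List.append_assoc, ← List.replicate_succ']
        simp only [pvLoopA, if_pos hg, hc0, hc1, hf0, hf1]
        rw [pv_newtext_len _ _ hg.le, hL]
        by_cases hcx : c = 'x'
        · rw [if_pos (by simp [hcx])]
          subst hcx
          by_cases hpar : (pre.length + m' + 2 + 1) % 2 ≠ 0
          · rw [if_pos hpar, hFl1]
            simp only [pvLoopB]
            congr 1
            exact pv_loopA_pad fuel _ (pre.length + ['x'].length) (m'+2) (pre.length + 1)
              (by simp; omega) (by simp)
          · rw [if_neg hpar]
            simp only [pvLoopB]
            congr 1
            exact pv_loopA_pad fuel _ (pre.length + ['x'].length) (m'+1) (pre.length + 1)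
              (by simp; omega) (by simp)
        · rw [if_neg (by simp [hcx])]
          rw [if_pos (by simp)]
          simp only [pvLoopB]
          have hxs : String.ofList ['x'] = "x" := rfl
          rw [hxs]
          congr 1
          exact pv_loopA_pad fuel _ (pre.length + [c].length) (m'+1) (pre.length + 2)
            (by simp; omega) (by simp)
    | c1 :: c2 :: rest =>
        rw [List.append_assoc]
        have hg : pre.length + 1 < (pre ++ ((c1 :: c2 :: rest) ++ List.replicate m 'x')).length := by
          simp
        have hc0 : (pre ++ ((c1 :: c2 :: rest) ++ List.replicate m 'x')).getD pre.length ' ' = c1 := by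
          rw [pv_text_getD0]; rfl
        have hc1 : (pre ++ ((c1 :: c2 :: rest) ++ List.replicate m 'x')).getD (pre.length + 1) ' ' = c2 := by
          rw [pv_text_getD]; rfl
        have hf0 : (List.replicate (pre.length + (c1 :: c2 :: rest).length) true ++
            List.replicate m false).getD pre.length false = true := by
          rw [pv_flag_getD]; simp
        have hf1 : (List.replicate (pre.length + (c1 :: c2 :: rest).length) true ++
            List.replicate m false).getD (pre.length + 1) false = true := by
          rw [pv_flag_getD]; simp
        have hL : (pre ++ ((c1 :: c2 :: rest) ++ List.replicate m 'x')).length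
            = pre.length + rest.length + m + 2 := by simp; omega
        have hcount : pre.length + (c1 :: c2 :: rest).length
            = (pre ++ [c1]).length + (c2 :: rest).length := by simp; omega
        have hidx : pre.length + 1 = (pre ++ [c1]).length := by simp
        have hFl : List.replicate (pre.length + (c1 :: c2 :: rest).length) true ++
              List.replicate m false ++ [false]
            = List.replicate ((pre ++ [c1]).length + (c2 :: rest).length) true ++
              List.replicate (m+1) false := by
          rw [List.append_assoc, ← List.replicate_succ', hcount]
        simp only [pvLoopA, if_pos hg, hc0, hc1, hf0, hf1]
        rw [pv_newtext_len _ _ hg.le, hL]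
        by_cases hc : c1 = c2
        · rw [if_pos (by simp [hc])]
          rw [show pvLoopB (c1 :: c2 :: rest) = [String.ofList [c1], "x"] :: pvLoopB (c2 :: rest) by
            simp [pvLoopB, hc]]
          by_cases hpar : (pre.length + rest.length + m + 2 + 1) % 2 ≠ 0
          · rw [if_pos hpar]
            congr 1
            have hT : pre ++ ((c1 :: c2 :: rest) ++ List.replicate m 'x') ++ ['x']
                = pre ++ [c1] ++ (c2 :: rest) ++ List.replicate (m+1) 'x' := by
              simp [List.replicate_succ']
            rw [hT, hFl, hidx]
            exact ih (c2 :: rest) (pre ++ [c1]) (m+1) (by simp at hf ⊢; omega)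
              (by intro h0; omega)
          · rw [if_neg hpar]
            congr 1
            have hT : pre ++ ((c1 :: c2 :: rest) ++ List.replicate m 'x')
                = pre ++ [c1] ++ (c2 :: rest) ++ List.replicate m 'x' := by simp
            rw [hT, hcount, hidx]
            refine ih (c2 :: rest) (pre ++ [c1]) m (by simp at hf ⊢; omega) ?_
            intro h0
            exfalso
            obtain ⟨h1, h2⟩ := hinv h0
            simp at h2 hpar
            omega
        · rw [if_neg (by simp [hc])]
          rw [if_pos (by simp)]
          rw [show pvLoopB (c1 :: c2 :: rest)
              = [String.ofList [c1], String.ofList [c2]] :: pvLoopB rest by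
            simp [pvLoopB, hc]]
          congr 1
          have hT : pre ++ ((c1 :: c2 :: rest) ++ List.replicate m 'x')
              = pre ++ [c1, c2] ++ rest ++ List.replicate m 'x' := by simp
          have hcount2 : pre.length + (c1 :: c2 :: rest).length
              = (pre ++ [c1, c2]).length + rest.length := by simp; omega
          have hidx2 : pre.length + 2 = (pre ++ [c1, c2]).length := by simp
          rw [hT, hcount2, hidx2]
          refine ih rest (pre ++ [c1, c2]) m (by simp at hf ⊢; omega) ?_
          intro h0
          obtain ⟨h1, h2⟩ := hinv h0
          constructor
          · simp at h1 ⊢; omega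
          · simp at h2 ⊢; omega

-- ===== VERDICT (by name: the statement is the Claim_ definition above) =====
theorem create_digraphs_spec : Claim_equal_create_digraphs := by
  intro text _
  show create_digraphs text = create_digraphs_alt text
  unfold create_digraphs create_digraphs_alt
  by_cases hp : text.toList.length % 2 ≠ 0
  · rw [if_pos hp]
    have h1 := pv_loopA_spec (2 * (text.toList.length + 1) + 2) text.toList [] 1
      (by omega) (by intro h0; exact absurd h0 (by omega))
    simp only [List.nil_append, List.length_nil, Nat.zero_add] at h1
    rw [← h1]
    simp [List.map_const', List.replicate_succ']
  · rw [if_neg hp]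
    have h0 : text.toList.length % 2 = 0 := by omega
    have h1 := pv_loopA_spec (2 * text.toList.length + 2) text.toList [] 0
      (by omega) (by intro _; exact ⟨h0, by simpa using h0⟩)
    simp only [List.nil_append, List.length_nil, Nat.zero_add, List.replicate_zero,
      List.append_nil] at h1
    rw [← h1]
    simp [List.map_const']
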